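-- pv_equiv track=rewrite | github.com/pypi-data/pypi-mirror-404 | packages/souleyez/souleyez-3.0.11-py3-none-any.whl/souleyez/intelligence/sensitive_tables.py | has_sensitive_columns
-- ===== SOURCE A (Python) =====
-- from typing import Dict, List, Optional, Tuple
--
-- SENSITIVE_COLUMN_KEYWORDS = {
--     "password",
--     "passwd",
--     "pass",
--     "pwd",
--     "secret",
--     "email",
--     "mail",
--     "phone",
--     "mobile",
--     "cell",
--     "ssn",
--     "social_security",
--     "national_id",
--     "tax_id",
--     "credit_card",
--     "cc_number",
--     "card_number",
--     "cvv",
--     "ccv",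
--     "token",
--     "api_key",
--     "apikey",
--     "auth_token",
--     "session",
--     "address",
--     "street",
--     "city",
--     "zip",
--     "postal",
--     "dob",
--     "date_of_birth",
--     "birthday",
--     "birthdate",
--     "salary",
--     "income",
--     "bank",
--     "account_number",
--     "routing",
-- }
--
-- def has_sensitive_columns(columns: List[str]) -> bool:
--     """
--     Check if any column name suggests sensitive data.
--
--     Args:
--         columns: List of column names or column dictionaries
--
--     Returns:
--         bool: True if sensitive columns detected
--
--     Examples:
--         >>> has_sensitive_columns(['id', 'username', 'password'])
--         True
--         >>> has_sensitive_columns(['id', 'name', 'description'])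
--         False
--     """
--     if not columns:
--         return False
--
--     for col in columns:
--         # Handle both string column names and dict with 'name' key
--         if isinstance(col, dict):
--             col_name = col.get("name", col.get("column", ""))
--         else:
--             col_name = str(col)
--
--         col_lower = col_name.lower()
--
--         # Check if any sensitive keyword appears in column name
--         for pattern in SENSITIVE_COLUMN_KEYWORDS:
--             if pattern in col_lower:
--                 return True
--
--     return False
-- ===== SOURCE B (Python) =====
-- KEYWORDS = (
--     "password", "passwd", "pass", "pwd", "secret", "email", "mail", "phone",
--     "mobile", "cell", "ssn", "social_security", "national_id", "tax_id",
--     "credit_card", "cc_number", "card_number", "cvv", "ccv", "token",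
--     "api_key", "apikey", "auth_token", "session", "address", "street",
--     "city", "zip", "postal", "dob", "date_of_birth", "birthday", "birthdate",
--     "salary", "income", "bank", "account_number", "routing",
-- )
--
-- # index the keywords by their first character, built once at import time
-- _BY_FIRST = {}
-- for _k in KEYWORDS:
--     _BY_FIRST.setdefault(_k[0], []).append(_k)
--
--
-- def has_sensitive_columns(columns):
--     # Position-based scan: walk every start position of each lowered name and,
--     # using the first-character index, test only the keywords that could begin
--     # exactly there (prefix match) — instead of a full substring search per keyword.
--     for col in columns:
--         if isinstance(col, dict):
--             name = col.get("name", col.get("column", ""))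
--         else:
--             name = str(col)
--         low = name.lower()
--         for i, ch in enumerate(low):
--             for k in _BY_FIRST.get(ch, ()):
--                 if low.startswith(k, i):
--                     return True
--     return False
-- ===== Notes on version B (the rewrite author's own statement) =====
-- stated objective: alternative
-- what changed: A runs a full substring search per keyword per column; B builds a first-character index of the keywords once and then walks every start position of each lowered name, prefix-testing only the keywords indexed under the character at that position.
import Mathlib
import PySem

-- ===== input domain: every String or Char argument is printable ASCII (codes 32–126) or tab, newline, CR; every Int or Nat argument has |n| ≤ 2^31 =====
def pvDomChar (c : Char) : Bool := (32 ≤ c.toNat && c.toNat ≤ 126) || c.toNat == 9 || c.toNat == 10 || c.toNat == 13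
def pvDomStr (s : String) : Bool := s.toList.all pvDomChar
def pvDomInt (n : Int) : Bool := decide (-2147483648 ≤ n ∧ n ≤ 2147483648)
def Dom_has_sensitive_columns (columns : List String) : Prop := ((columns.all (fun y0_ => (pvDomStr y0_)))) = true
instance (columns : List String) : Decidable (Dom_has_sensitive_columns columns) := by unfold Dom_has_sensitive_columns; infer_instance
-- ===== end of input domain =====

-- B replaces A's per-keyword substring search by a position-based scan: a first-character
-- index of the keywords is built once, and each start position of a lowered name is
-- prefix-tested against only the keywords indexed under its character (alternative).


-- ===== PORT A =====
-- SENSITIVE_COLUMN_KEYWORDS (a Python set of distinct string literals; only membership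
-- is used, so the listed order carries no meaning)
def pvKeywords : List String :=
  ["password", "passwd", "pass", "pwd", "secret", "email", "mail", "phone",
   "mobile", "cell", "ssn", "social_security", "national_id", "tax_id",
   "credit_card", "cc_number", "card_number", "cvv", "ccv", "token",
   "api_key", "apikey", "auth_token", "session", "address", "street",
   "city", "zip", "postal", "dob", "date_of_birth", "birthday", "birthdate",
   "salary", "income", "bank", "account_number", "routing"]

-- the `for col in columns` loop with its early `return True`
-- (columns : List String, so the `isinstance(col, dict)` branch is never taken
-- and `str(col)` is `col`)
def pvALoop : List String → Bool
  | [] => false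
  | col :: rest =>
    if pvKeywords.any (fun pat => PySem.Str.isIn pat (PySem.Str.lower col)) then true
    else pvALoop rest

def has_sensitive_columns (columns : List String) : Bool :=
  if columns.isEmpty then false else pvALoop columns

-- ===== PORT B =====
-- Source B's KEYWORDS tuple, as character lists (B works position-wise on characters)
def pvKw : List (List Char) :=
  [   ['p', 'a', 's', 's', 'w', 'o', 'r', 'd'],
   ['p', 'a', 's', 's', 'w', 'd'],
   ['p', 'a', 's', 's'],
   ['p', 'w', 'd'],
   ['s', 'e', 'c', 'r', 'e', 't'],
   ['e', 'm', 'a', 'i', 'l'],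
   ['m', 'a', 'i', 'l'],
   ['p', 'h', 'o', 'n', 'e'],
   ['m', 'o', 'b', 'i', 'l', 'e'],
   ['c', 'e', 'l', 'l'],
   ['s', 's', 'n'],
   ['s', 'o', 'c', 'i', 'a', 'l', '_', 's', 'e', 'c', 'u', 'r', 'i', 't', 'y'],
   ['n', 'a', 't', 'i', 'o', 'n', 'a', 'l', '_', 'i', 'd'],
   ['t', 'a', 'x', '_', 'i', 'd'],
   ['c', 'r', 'e', 'd', 'i', 't', '_', 'c', 'a', 'r', 'd'],
   ['c', 'c', '_', 'n', 'u', 'm', 'b', 'e', 'r'],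
   ['c', 'a', 'r', 'd', '_', 'n', 'u', 'm', 'b', 'e', 'r'],
   ['c', 'v', 'v'],
   ['c', 'c', 'v'],
   ['t', 'o', 'k', 'e', 'n'],
   ['a', 'p', 'i', '_', 'k', 'e', 'y'],
   ['a', 'p', 'i', 'k', 'e', 'y'],
   ['a', 'u', 't', 'h', '_', 't', 'o', 'k', 'e', 'n'],
   ['s', 'e', 's', 's', 'i', 'o', 'n'],
   ['a', 'd', 'd', 'r', 'e', 's', 's'],
   ['s', 't', 'r', 'e', 'e', 't'],
   ['c', 'i', 't', 'y'],
   ['z', 'i', 'p'],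
   ['p', 'o', 's', 't', 'a', 'l'],
   ['d', 'o', 'b'],
   ['d', 'a', 't', 'e', '_', 'o', 'f', '_', 'b', 'i', 'r', 't', 'h'],
   ['b', 'i', 'r', 't', 'h', 'd', 'a', 'y'],
   ['b', 'i', 'r', 't', 'h', 'd', 'a', 't', 'e'],
   ['s', 'a', 'l', 'a', 'r', 'y'],
   ['i', 'n', 'c', 'o', 'm', 'e'],
   ['b', 'a', 'n', 'k'],
   ['a', 'c', 'c', 'o', 'u', 'n', 't', '_', 'n', 'u', 'm', 'b', 'e', 'r'],
   ['r', 'o', 'u', 't', 'i', 'n', 'g']]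

-- `_BY_FIRST`: the keywords indexed by their first character, built once by the
-- module-level loop (`setdefault(k[0], []).append(k)` = modify with default [])
-- (`k.headD ' '` is `k[0]`; every keyword is nonempty, so the default is never used)
def pvByFirst : PySem.Dict Char (List (List Char)) :=
  pvKw.foldl (fun d k => d.modify (k.headD ' ') [] (fun v => v ++ [k])) PySem.Dict.empty

-- `for i, ch in enumerate(low): for k in _BY_FIRST.get(ch, ()): if low.startswith(k, i)`:
-- walk the suffixes of the lowered name and test, at each position, a prefix match for
-- exactly the keywords indexed under the character at that position
def pvScanB : List Char → Bool
  | [] => false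
  | c :: rest =>
    (PySem.Dict.getD pvByFirst c []).any (fun k => List.isPrefixOf k (c :: rest)) || pvScanB rest

def has_sensitive_columns_alt (columns : List String) : Bool :=
  columns.any (fun col => pvScanB (PySem.Chars.lower col.toList))

-- ===== PRECONDITION & SPEC =====
def Spec_has_sensitive_columns (columns : List String) (out : Bool) : Prop := out = has_sensitive_columns_alt columns
instance (columns : List String) (out : Bool) : Decidable (Spec_has_sensitive_columns columns out) := by unfold Spec_has_sensitive_columns; infer_instance

-- ===== CLAIM (what is proved, stated in full; the proofs are below) =====
def Claim_equal_has_sensitive_columns : Prop := ∀ (columns : List String), Dom_has_sensitive_columns columns → Spec_has_sensitive_columns columns (has_sensitive_columns columns)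

-- ===== LEMMAS AND PROOFS =====

-- B's keyword table is A's keyword list, character-wise
theorem pvKw_eq : pvKw = pvKeywords.map String.toList := by decide

-- no keyword is empty (so no keyword is an infix of [])
theorem pvKw_ne_nil : ∀ k ∈ pvKw, k ≠ [] := by decide

-- the first-character index holds exactly the keywords starting with that character
theorem pvByFirst_getD (c : Char) :
    PySem.Dict.getD pvByFirst c [] = pvKw.filter (fun k => k.headD ' ' == c) := by
  unfold pvByFirst
  have h : pvKw.foldl (fun d k => d.modify (k.headD ' ') [] (fun v => v ++ [k]))
        PySem.Dict.empty
      = (pvKw.map (fun k => (k.headD ' ', k))).foldl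
          (fun d p => d.modify p.1 [] (fun v => v ++ [p.2])) PySem.Dict.empty := by
    rw [List.foldl_map]
  rw [h, PySem.Dict.getD_foldl_modify_append, PySem.Dict.getD_empty,
    List.filter_map, List.map_map]
  simp [Function.comp_def]

-- at a position starting with c, only keywords indexed under c can match
theorem pvAny_getD (c : Char) (rest : List Char) :
    (PySem.Dict.getD pvByFirst c []).any (fun k => List.isPrefixOf k (c :: rest))
      = pvKw.any (fun k => List.isPrefixOf k (c :: rest)) := by
  rw [pvByFirst_getD, Bool.eq_iff_iff]
  simp only [List.any_eq_true, List.mem_filter, List.isPrefixOf_iff_prefix]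
  constructor
  · rintro ⟨k, ⟨hk, _⟩, hp⟩; exact ⟨k, hk, hp⟩
  · rintro ⟨k, hk, hp⟩
    refine ⟨k, ⟨hk, ?_⟩, hp⟩
    rcases k with _ | ⟨a, k'⟩
    · exact absurd rfl (pvKw_ne_nil [] hk)
    · rcases List.cons_prefix_cons.mp hp with ⟨rfl, -⟩
      simp [List.headD]

-- B's suffix walk finds exactly the keywords occurring as an infix
theorem pvScanB_iff (s : List Char) :
    pvScanB s = true ↔ ∃ k ∈ pvKw, k <:+: s := by
  induction s with
  | nil =>
    simp only [pvScanB, Bool.false_eq_true, false_iff]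
    rintro ⟨k, hk, hinf⟩
    exact pvKw_ne_nil k hk (List.infix_nil.mp hinf)
  | cons c rest ih =>
    simp only [pvScanB, pvAny_getD, Bool.or_eq_true, List.any_eq_true, ih]
    constructor
    · rintro (⟨k, hk, hpre⟩ | ⟨k, hk, hinf⟩)
      · exact ⟨k, hk, (List.isPrefixOf_iff_prefix.mp hpre).isInfix⟩
      · exact ⟨k, hk, hinf.trans (List.suffix_cons c rest).isInfix⟩
    · rintro ⟨k, hk, hinf⟩
      rcases List.infix_cons_iff.mp hinf with hpre | hinf'
      · exact Or.inl ⟨k, hk, List.isPrefixOf_iff_prefix.mpr hpre⟩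
      · exact Or.inr ⟨k, hk, hinf'⟩

-- A's loop is an `any` over the columns
theorem pvALoop_eq_any (columns : List String) :
    pvALoop columns
      = columns.any (fun col => pvKeywords.any (fun pat => PySem.Str.isIn pat (PySem.Str.lower col))) := by
  induction columns with
  | nil => rfl
  | cons c rest ih =>
    simp only [pvALoop, List.any_cons, ih]
    cases pvKeywords.any (fun pat => PySem.Str.isIn pat (PySem.Str.lower c)) <;> simp

-- ===== VERDICT (by name: the statement is the Claim_ definition above) =====
theorem has_sensitive_columns_spec : Claim_equal_has_sensitive_columns := by
  unfold Claim_equal_has_sensitive_columns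
  intro columns _
  unfold Spec_has_sensitive_columns has_sensitive_columns has_sensitive_columns_alt
  rcases columns with _ | ⟨c0, rest⟩
  · rfl
  rw [if_neg (by simp), pvALoop_eq_any]
  refine List.any_congr rfl (fun col => ?_)
  rw [Bool.eq_iff_iff, pvScanB_iff, pvKw_eq]
  simp only [List.any_eq_true, PySem.Str.isIn_iff_infix, PySem.Str.toList_lower,
    List.mem_map]
  constructor
  · rintro ⟨pat, hpat, hinf⟩; exact ⟨pat.toList, ⟨pat, hpat, rfl⟩, hinf⟩
  · rintro ⟨k, ⟨pat, hpat, rfl⟩, hinf⟩; exact ⟨pat, hpat, hinf⟩
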